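-- pv_equiv track=rewrite | github.com/sergekostenchuk/Auto-iFlow-3.1.1-code | apps/backend/spec/validate_pkg/scope_contract_rules.py | validate_scope_rules
-- ===== SOURCE A (Python) =====
-- def _normalize_path(path: str) -> str:
--     cleaned = path.strip().replace("\\", "/")
--     if cleaned.endswith("/"):
--         cleaned = cleaned[:-1]
--     return cleaned
--
-- def _strip_glob(path: str) -> str:
--     cleaned = _normalize_path(path)
--     if cleaned.endswith("/**"):
--         return cleaned[:-3]
--     return cleaned
--
-- def validate_scope_rules(
--     allowed_paths: list[str], forbidden_paths: list[str]
-- ) -> tuple[list[str], list[str]]: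
--     errors: list[str] = []
--     warnings: list[str] = []
--
--     if not allowed_paths:
--         errors.append("allowed_paths must not be empty")
--
--     for path in allowed_paths:
--         normalized = _normalize_path(path)
--         if normalized.startswith("/"):
--             errors.append(f"allowed_paths must be relative: {path}")
--
--     forbidden_bases = [_strip_glob(path) for path in forbidden_paths]
--     for allowed in allowed_paths:
--         allowed_base = _strip_glob(allowed)
--         for forbidden_base in forbidden_bases:
--             if not forbidden_base:
--                 continue
--             if allowed_base == forbidden_base or allowed_base.startswith(
--                 f"{forbidden_base}/"
--             ):
--                 errors.append(
--                     f"allowed_paths overlaps forbidden_paths: {allowed} -> {forbidden_base}"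
--                 )
--
--     if not forbidden_paths:
--         warnings.append("forbidden_paths is empty")
--
--     return errors, warnings
-- ===== SOURCE B (Python) =====
-- def _normalize_path(path: str) -> str:
--     cleaned = path.strip().replace("\\", "/")
--     if cleaned.endswith("/"):
--         cleaned = cleaned[:-1]
--     return cleaned
--
-- def _strip_glob(path: str) -> str:
--     cleaned = _normalize_path(path)
--     if cleaned.endswith("/**"):
--         return cleaned[:-3]
--     return cleaned
--
-- def _ancestors(base: str) -> list[str]:
--     # every prefix of `base` that ends just before a "/", plus `base` itself
--     return [base[:j] for j, ch in enumerate(base) if ch == "/"] + [base]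
--
-- def validate_scope_rules(
--     allowed_paths: list[str], forbidden_paths: list[str]
-- ) -> tuple[list[str], list[str]]:
--     errors: list[str] = []
--     if not allowed_paths:
--         errors.append("allowed_paths must not be empty")
--     errors += [
--         f"allowed_paths must be relative: {path}"
--         for path in allowed_paths
--         if _normalize_path(path).startswith("/")
--     ]
--     # index the forbidden bases once: base -> increasing original indices
--     items = [(base, i) for i, base in enumerate(map(_strip_glob, forbidden_paths)) if base]
--     index: dict[str, list[int]] = {}
--     for base, i in items:
--         index.setdefault(base, []).append(i)
--     for allowed in allowed_paths:
--         hits = [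
--             (i, anc)
--             for anc in _ancestors(_strip_glob(allowed))
--             for i in index.get(anc, ())
--         ]
--         hits.sort(key=lambda h: h[0])
--         errors += [
--             f"allowed_paths overlaps forbidden_paths: {allowed} -> {anc}"
--             for _i, anc in hits
--         ]
--     warnings = ["forbidden_paths is empty"] if not forbidden_paths else []
--     return errors, warnings
-- ===== Notes on version B (the rewrite author's own statement) =====
-- stated objective: alternative
-- what changed: A compares every allowed path against every forbidden base with string prefix tests; B instead builds a dict index of the nonempty forbidden bases once and, for each allowed path, looks up only that path's ancestor prefixes in the dict, re-emitting the collected matches sorted by original forbidden index; the inner test scan over the forbidden list disappears, but on match-heavy inputs the emitted error list itself dominates, so the measured cost is the same.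
import Mathlib
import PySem

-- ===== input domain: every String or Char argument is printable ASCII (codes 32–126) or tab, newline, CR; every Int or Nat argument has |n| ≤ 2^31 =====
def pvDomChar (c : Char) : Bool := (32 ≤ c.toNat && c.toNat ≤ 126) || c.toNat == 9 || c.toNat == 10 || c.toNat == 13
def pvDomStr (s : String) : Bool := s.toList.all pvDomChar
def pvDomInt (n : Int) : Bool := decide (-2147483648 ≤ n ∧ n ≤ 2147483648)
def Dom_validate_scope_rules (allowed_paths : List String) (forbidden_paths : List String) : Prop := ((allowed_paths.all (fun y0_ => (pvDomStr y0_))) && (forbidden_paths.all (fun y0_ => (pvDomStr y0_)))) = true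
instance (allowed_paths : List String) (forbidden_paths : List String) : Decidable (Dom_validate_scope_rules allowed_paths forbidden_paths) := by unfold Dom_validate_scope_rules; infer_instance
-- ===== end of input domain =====

-- B replaces A's allowed×forbidden nested scan by a dict index of the forbidden bases
-- plus an ancestor-prefix lookup per allowed path (results re-emitted in original order).

-- ===== PORT A =====
-- shared helpers: Source A's and Source B's _normalize_path/_strip_glob are the same code
def pvNorm (path : String) : String :=
  let cleaned := PySem.Str.replace (PySem.Str.strip path) "\\" "/"
  if PySem.Str.endswith cleaned "/" then PySem.Str.slice cleaned none (some (-1)) else cleaned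

def pvStripGlob (path : String) : String :=
  let cleaned := pvNorm path
  if PySem.Str.endswith cleaned "/**" then PySem.Str.slice cleaned none (some (-3)) else cleaned

def pvMsgEmpty : String := "allowed_paths must not be empty"
def pvMsgRel (p : String) : String := "allowed_paths must be relative: " ++ p
def pvMsgOv (a fb : String) : String := "allowed_paths overlaps forbidden_paths: " ++ a ++ " -> " ++ fb
def pvMsgWarn : String := "forbidden_paths is empty"

def validate_scope_rules (allowed_paths : List String) (forbidden_paths : List String) : List String × List String :=
  let errors : List String := if allowed_paths = [] then [pvMsgEmpty] else []
  let errors := allowed_paths.foldl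
    (fun acc path => if PySem.Str.startswith (pvNorm path) "/" then acc ++ [pvMsgRel path] else acc) errors
  let forbidden_bases := forbidden_paths.map pvStripGlob
  let errors := allowed_paths.foldl
    (fun acc allowed =>
      let allowed_base := pvStripGlob allowed
      forbidden_bases.foldl
        (fun acc fb =>
          if fb == "" then acc
          else if allowed_base == fb || PySem.Str.startswith allowed_base (fb ++ "/") then
            acc ++ [pvMsgOv allowed fb]
          else acc) acc) errors
  let warnings : List String := if forbidden_paths = [] then [pvMsgWarn] else []
  (errors, warnings)

-- ===== PORT B =====
-- Source B's _ancestors: every prefix ending just before a "/", plus the string itself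
def pvAncestors (base : String) : List String :=
  ((PySem.List.enumerate base.toList 0).filterMap
    (fun q => if q.2 == '/' then some (PySem.Str.slice base none (some q.1)) else none)) ++ [base]

-- Source B's items list: (stripped base, original index) for nonempty bases
def pvItems (bases : List String) : List (String × Int) :=
  (PySem.List.enumerate bases 0).filterMap
    (fun p => if p.2 == "" then none else some (p.2, p.1))

-- Source B's index dict: base -> increasing list of original indices (setdefault(...).append)
def pvIndex (bases : List String) : PySem.Dict String (List Int) :=
  (pvItems bases).foldl (fun d q => d.modify q.1 [] (fun v => v ++ [q.2])) PySem.Dict.empty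

def validate_scope_rules_alt (allowed_paths : List String) (forbidden_paths : List String) : List String × List String :=
  let errors : List String := if allowed_paths = [] then [pvMsgEmpty] else []
  let errors := errors ++ (allowed_paths.filter (fun p => PySem.Str.startswith (pvNorm p) "/")).map pvMsgRel
  let index := pvIndex (forbidden_paths.map pvStripGlob)
  let errors := allowed_paths.foldl
    (fun acc allowed =>
      let hits := (pvAncestors (pvStripGlob allowed)).flatMap
        (fun anc => (index.getD anc []).map (fun i => (i, anc)))
      acc ++ (PySem.List.sorted hits (fun h => h.1)).map (fun h => pvMsgOv allowed h.2)) errors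
  let warnings : List String := if forbidden_paths = [] then [pvMsgWarn] else []
  (errors, warnings)

-- ===== PRECONDITION & SPEC =====
def Spec_validate_scope_rules (allowed_paths : List String) (forbidden_paths : List String) (out : List String × List String) : Prop := out = validate_scope_rules_alt allowed_paths forbidden_paths
instance (allowed_paths : List String) (forbidden_paths : List String) (out : List String × List String) : Decidable (Spec_validate_scope_rules allowed_paths forbidden_paths out) := by unfold Spec_validate_scope_rules; infer_instance

-- ===== CLAIM (what is proved, stated in full; the proofs are below) =====
def Claim_equal_validate_scope_rules : Prop := ∀ (allowed_paths : List String) (forbidden_paths : List String), Dom_validate_scope_rules allowed_paths forbidden_paths → Spec_validate_scope_rules allowed_paths forbidden_paths (validate_scope_rules allowed_paths forbidden_paths)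

-- ===== LEMMAS AND PROOFS =====

-- combined overlap test, as a Bool on the forbidden base
def pvHit (ab fb : String) : Bool :=
  (!(fb == "")) && (ab == fb || PySem.Str.startswith ab (fb ++ "/"))

-- "fb/" is a prefix of cs exactly when fb is a prefix of cs cut at a '/'
lemma prefix_slash_iff (cs fs : List Char) :
    (cs = fs ∨ (fs ++ ['/']) <+: cs) ↔
      (fs = cs ∨ ∃ k, ∃ _ : k < cs.length, cs[k] = '/' ∧ fs = cs.take k) := by
  constructor
  · rintro (rfl | ⟨t, ht⟩)
    · left; rfl
    · right
      subst ht
      refine ⟨fs.length, by simp, ?_, ?_⟩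
      · simp
      · rw [List.append_assoc, List.take_left]
  · rintro (rfl | ⟨k, hk, hsl, rfl⟩)
    · left; rfl
    · right
      have h : cs.take k ++ ['/'] = cs.take (k + 1) := by
        rw [List.take_succ_eq_append_getElem hk, hsl]
      rw [h]
      exact List.take_prefix _ _

-- characterisation of membership in pvAncestors
lemma mem_pvAncestors (ab fb : String) :
    fb ∈ pvAncestors ab ↔
      (fb = ab ∨ ∃ k, ∃ _ : k < ab.toList.length, ab.toList[k] = '/' ∧ fb.toList = ab.toList.take k) := by
  simp only [pvAncestors, List.mem_append, List.mem_filterMap, PySem.List.mem_enumerate_iff,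
    List.mem_singleton, or_comm]
  apply or_congr_right
  constructor
  · rintro ⟨a, ⟨k, hk, rfl⟩, ha⟩
    simp only [zero_add] at ha
    by_cases h : ab.toList[k] == '/' <;> simp [h] at ha
    refine ⟨k, hk, by simpa using h, ?_⟩
    rw [← ha]
    rw [PySem.Str.toList_slice]
    simp [PySem.Chars.slice_eq_listSlice, PySem.List.slice_to_natCast]
  · rintro ⟨k, hk, hsl, htl⟩
    refine ⟨(0 + k, ab.toList[k]), ⟨k, hk, rfl⟩, ?_⟩
    simp only [zero_add, hsl]
    rw [if_pos (by simp)]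
    congr 1
    apply String.toList_inj.mp
    rw [PySem.Str.toList_slice]
    simp [PySem.Chars.slice_eq_listSlice, PySem.List.slice_to_natCast, htl]

-- the overlap condition tested by A is exactly ancestor membership
lemma pvHit_iff (ab fb : String) :
    pvHit ab fb = true ↔ (fb ≠ "" ∧ fb ∈ pvAncestors ab) := by
  rw [mem_pvAncestors]
  unfold pvHit
  rw [Bool.and_eq_true, Bool.not_eq_eq_eq_not, Bool.or_eq_true, beq_iff_eq]
  apply and_congr
  · simp
  · rw [show PySem.Str.startswith ab (fb ++ "/") = true ↔ (fb ++ "/").toList <+: ab.toList from by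
      simp [PySem.Chars.startswith_iff]]
    rw [String.toList_append, show ("/" : String).toList = ['/'] from rfl]
    constructor
    · rintro (rfl | h)
      · exact Or.inl rfl
      · rcases (prefix_slash_iff ab.toList fb.toList).mp (Or.inr h) with h' | ⟨k, hk, h1, h2⟩
        · exact Or.inl (String.toList_inj.mp h')
        · exact Or.inr ⟨k, hk, h1, h2⟩
    · rintro (rfl | ⟨k, hk, h1, h2⟩)
      · exact Or.inl rfl
      · rcases (prefix_slash_iff ab.toList fb.toList).mpr (Or.inr ⟨k, hk, h1, h2⟩) with h' | h'
        · exact Or.inl (String.toList_inj.mp h')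
        · exact Or.inr h'

-- membership in Source B's items list
lemma mem_pvItems (bases : List String) (q : String × Int) :
    q ∈ pvItems bases ↔ ∃ k, ∃ _ : k < bases.length, q = (bases[k], (k : Int)) ∧ bases[k] ≠ "" := by
  simp only [pvItems, List.mem_filterMap, PySem.List.mem_enumerate_iff]
  constructor
  · rintro ⟨a, ⟨k, hk, rfl⟩, ha⟩
    simp only [zero_add] at ha
    by_cases h : bases[k] == "" <;> simp [h] at ha
    exact ⟨k, hk, ha.symm ▸ rfl, by simpa using h⟩
  · rintro ⟨k, hk, rfl, hne⟩
    exact ⟨(0 + k, bases[k]), ⟨k, hk, rfl⟩, by simp [hne]⟩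

-- the dict lookup returns exactly the filtered index list
lemma getD_pvIndex (bases : List String) (c : String) :
    (pvIndex bases).getD c [] = ((pvItems bases).filter (fun q => q.1 == c)).map (fun q => q.2) := by
  unfold pvIndex
  rw [PySem.Dict.getD_foldl_modify_append]
  simp

-- items have strictly increasing second components
lemma pvItems_pairwise (bases : List String) :
    (pvItems bases).Pairwise (fun p q => p.2 < q.2) := by
  refine List.Pairwise.filterMap _ ?_ (PySem.List.pairwise_lt_enumerate bases 0)
  rintro a b hab c hc d hd
  by_cases h1 : a.2 == "" <;> simp [h1] at hc
  by_cases h2 : b.2 == "" <;> simp [h2] at hd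
  subst hc; subst hd; simpa using hab

lemma pvItems_snd_ne (bases : List String) {q r : String × Int} (hq : q ∈ pvItems bases)
    (hr : r ∈ pvItems bases) (hne : q ≠ r) : q.2 ≠ r.2 := by
  have hp : (pvItems bases).Pairwise (fun p q => p.2 ≠ q.2) :=
    (pvItems_pairwise bases).imp (fun h => ne_of_lt h)
  exact hp.forall (fun a b h => h.symm) hq hr hne

lemma slice_len (ab : String) (k : Nat) (hk : k ≤ ab.toList.length) :
    (PySem.Str.slice ab none (some (0 + (k : Int)))).toList.length = k := by
  rw [PySem.Str.toList_slice]
  have hlen : ab.toList.length = ab.length := by simp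
  simp [PySem.Chars.slice_eq_listSlice, PySem.List.slice_to_natCast]
  omega

-- ancestors have strictly increasing lengths, hence are distinct
lemma pvAncestors_pairwise (ab : String) :
    (pvAncestors ab).Pairwise (fun a b => a.toList.length < b.toList.length) := by
  unfold pvAncestors
  rw [List.pairwise_append]
  refine ⟨?_, by simp, ?_⟩
  · have h := (PySem.List.pairwise_lt_enumerate ab.toList 0)
    rw [List.Pairwise.and_mem] at h
    refine List.Pairwise.filterMap _ ?_ h
    rintro a b ⟨ha, hb, hab⟩ c hc d hd
    rcases (PySem.List.mem_enumerate_iff _ _ _).mp ha with ⟨k, hk, rfl⟩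
    rcases (PySem.List.mem_enumerate_iff _ _ _).mp hb with ⟨m, hm, rfl⟩
    by_cases h1 : ab.toList[k] == '/' <;>
      simp only [h1, Bool.false_eq_true, if_true, if_false, reduceCtorEq, Option.some.injEq] at hc
    by_cases h2 : ab.toList[m] == '/' <;>
      simp only [h2, Bool.false_eq_true, if_true, if_false, reduceCtorEq, Option.some.injEq] at hd
    subst hc; subst hd
    rw [slice_len ab k (le_of_lt hk), slice_len ab m (le_of_lt hm)]
    simpa using hab
  · rintro c hc b hb
    rcases List.mem_filterMap.mp hc with ⟨q, hq, hsome⟩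
    rcases (PySem.List.mem_enumerate_iff _ _ _).mp hq with ⟨k, hk, rfl⟩
    by_cases h1 : ab.toList[k] == '/' <;>
      simp only [h1, Bool.false_eq_true, if_true, if_false, reduceCtorEq, Option.some.injEq] at hsome
    subst hsome
    rw [List.mem_singleton.mp hb]
    rw [slice_len ab k (le_of_lt hk)]
    exact hk

lemma pvAncestors_nodup (ab : String) : (pvAncestors ab).Nodup := by
  refine (pvAncestors_pairwise ab).imp ?_
  intro a b h heq
  rw [heq] at h
  exact lt_irrefl _ h

lemma bucket_nodup (bases : List String) (c : String) : ((pvIndex bases).getD c []).Nodup := by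
  rw [getD_pvIndex]
  have h1 : (((pvItems bases).filter (fun q => q.1 == c)).map (fun q => q.2)).Pairwise (· < ·) :=
    List.Pairwise.map _ (fun a b h => h) ((pvItems_pairwise bases).filter _)
  exact h1.imp (fun h => ne_of_lt h)

-- the sorted hit list is exactly the filtered enumeration, in original order
lemma sorted_hits (ab : String) (bases : List String) :
    PySem.List.sorted
        ((pvAncestors ab).flatMap
          (fun anc => ((pvIndex bases).getD anc []).map (fun i => (i, anc))))
        (fun h => h.1)
      = (PySem.List.enumerate bases 0).filter (fun q => pvHit ab q.2) := by
  apply PySem.List.sorted_eq_of_perm_of_pairwise_lt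
  · refine (List.perm_ext_iff_of_nodup ?_ ?_).mpr ?_
    · -- target nodup
      refine ((PySem.List.pairwise_lt_enumerate bases 0).filter _).imp ?_
      intro a b h heq
      rw [heq] at h
      exact lt_irrefl _ h
    · -- hits nodup
      refine List.Nodup.of_map (fun h => h.1) ?_
      rw [List.map_flatMap]
      have hform : (fun anc => (((pvIndex bases).getD anc []).map (fun i => (i, anc))).map (fun h => h.1))
          = fun anc => (pvIndex bases).getD anc [] := by
        funext anc
        rw [List.map_map,
          show ((fun (h : Int × String) => h.1) ∘ fun i => (i, anc)) = fun i => i from rfl,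
          List.map_id']
      rw [hform]
      rw [List.nodup_flatMap]
      constructor
      · intro c _
        exact bucket_nodup bases c
      · refine (pvAncestors_nodup ab).imp ?_
        intro a b hne i hia hib
        simp only [] at hia hib
        rw [getD_pvIndex] at hia hib
        rcases List.mem_map.mp hia with ⟨q, hq, rfl⟩
        rcases List.mem_map.mp hib with ⟨r, hr, hqr⟩
        have hq' := List.mem_filter.mp hq
        have hr' := List.mem_filter.mp hr
        have hqa : q.1 = a := by simpa using hq'.2
        have hrb : r.1 = b := by simpa using hr'.2
        have : q ≠ r := fun h => hne (by rw [← hqa, ← hrb, h])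
        exact pvItems_snd_ne bases hq'.1 hr'.1 this hqr.symm
    · -- membership
      intro x
      rw [List.mem_filter, List.mem_flatMap]
      constructor
      · rintro ⟨hx, hhit⟩
        rcases (PySem.List.mem_enumerate_iff _ _ _).mp hx with ⟨k, hk, rfl⟩
        rcases (pvHit_iff ab bases[k]).mp (by simpa using hhit) with ⟨hne, hmem⟩
        refine ⟨bases[k], hmem, ?_⟩
        rw [getD_pvIndex]
        refine List.mem_map.mpr ⟨(0 + (k : Int)), ?_, rfl⟩
        refine List.mem_map.mpr ⟨(bases[k], (0 + (k : Int))), ?_, rfl⟩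
        refine List.mem_filter.mpr ⟨(mem_pvItems bases _).mpr ⟨k, hk, by simp, hne⟩, by simp⟩
      · rintro ⟨anc, hanc, hx⟩
        rcases List.mem_map.mp hx with ⟨i, hi, rfl⟩
        rw [getD_pvIndex] at hi
        rcases List.mem_map.mp hi with ⟨q, hq, rfl⟩
        have hq' := List.mem_filter.mp hq
        rcases (mem_pvItems bases q).mp hq'.1 with ⟨k, hk, hqe, hne⟩
        have hanc' : q.1 = anc := by simpa using hq'.2
        subst hqe
        constructor
        · refine (PySem.List.mem_enumerate_iff _ _ _).mpr ⟨k, hk, ?_⟩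
          simp [← hanc']
        · refine (pvHit_iff ab _).mpr ⟨?_, ?_⟩
          · simpa [← hanc'] using hne
          · exact hanc
  · exact (PySem.List.pairwise_lt_enumerate bases 0).filter _

-- filtering an enumeration and reading back the payload is filtering the list
lemma filter_enumerate_map_snd {α β : Type} (l : List α) (s : Int) (p : α → Bool) (f : α → β) :
    ((PySem.List.enumerate l s).filter (fun q => p q.2)).map (fun q => f q.2)
      = (l.filter p).map f := by
  induction l generalizing s with
  | nil => simp [PySem.List.enumerate_nil]
  | cons x xs ih =>
    rw [PySem.List.enumerate_cons]
    by_cases h : p x = true <;> simp [h, ih]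

-- A's inner loop over the forbidden bases emits the filtered messages
lemma innerA_eq (ab : String) (allowed : String) (bases : List String) (acc : List String) :
    bases.foldl
        (fun acc fb =>
          if fb == "" then acc
          else if ab == fb || PySem.Str.startswith ab (fb ++ "/") then
            acc ++ [pvMsgOv allowed fb]
          else acc) acc
      = acc ++ (bases.filter (pvHit ab)).map (pvMsgOv allowed) := by
  have hfun : (fun (acc : List String) fb =>
        if fb == "" then acc
        else if ab == fb || PySem.Str.startswith ab (fb ++ "/") then
          acc ++ [pvMsgOv allowed fb]
        else acc)
      = (fun acc fb => if pvHit ab fb then acc ++ [pvMsgOv allowed fb] else acc) := by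
    funext acc fb
    by_cases h : fb == "" <;> simp [pvHit, h]
  rw [hfun, PySem.List.foldl_append_if]

-- ===== VERDICT (by name: the statement is the Claim_ definition above) =====
theorem validate_scope_rules_spec : Claim_equal_validate_scope_rules := by
  intro ap fp _hdom
  unfold Spec_validate_scope_rules validate_scope_rules validate_scope_rules_alt
  simp only []
  refine Prod.ext ?_ rfl
  rw [PySem.List.foldl_append_if]
  have hfunA : (fun (acc : List String) allowed =>
        let allowed_base := pvStripGlob allowed
        (fp.map pvStripGlob).foldl
          (fun acc fb =>
            if fb == "" then acc
            else if allowed_base == fb || PySem.Str.startswith allowed_base (fb ++ "/") then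
              acc ++ [pvMsgOv allowed fb]
            else acc) acc)
      = (fun acc allowed =>
          acc ++ ((fp.map pvStripGlob).filter (pvHit (pvStripGlob allowed))).map (pvMsgOv allowed)) := by
    funext acc allowed
    exact innerA_eq (pvStripGlob allowed) allowed (fp.map pvStripGlob) acc
  have hfunB : (fun (acc : List String) allowed =>
        acc ++ (PySem.List.sorted
            ((pvAncestors (pvStripGlob allowed)).flatMap
              (fun anc => ((pvIndex (fp.map pvStripGlob)).getD anc []).map (fun i => (i, anc))))
            (fun h => h.1)).map (fun h => pvMsgOv allowed h.2))
      = (fun acc allowed =>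
          acc ++ ((fp.map pvStripGlob).filter (pvHit (pvStripGlob allowed))).map (pvMsgOv allowed)) := by
    funext acc allowed
    rw [sorted_hits (pvStripGlob allowed) (fp.map pvStripGlob),
      filter_enumerate_map_snd (fp.map pvStripGlob) 0 (pvHit (pvStripGlob allowed)) (pvMsgOv allowed)]
  rw [hfunA, hfunB, PySem.List.foldl_append_eq_flatMap]
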